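-- pv_equiv track=rewrite | github.com/rohitBCI/Combinatorial-optimization-for-socially-distanced-seating | combinatorial_approach.py | intersec_arrays
-- ===== SOURCE A (Python) =====
-- def intersec_arrays(d,e):
--     unq = []
--     inter = []
--     inter1 = []
--     for i in d:
--         for j in i:
--             if j in unq:
--                 inter.append(j)
--             else:
--                 unq.append(j)
--     for i in e:
--         if i in inter:
--             inter1.append(j)
--     return len(inter1)
-- ===== SOURCE B (Python) =====
-- def intersec_arrays(d, e):
--     flat = [j for i in d for j in i]
--     return sum(1 for i in e if flat.count(i) >= 2)
-- ===== Notes on version B (the rewrite author's own statement) =====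
-- stated objective: simpler
-- what changed: B drops A's unq/inter duplicate-tracking state entirely: it flattens d once and counts the elements of e whose value occurs at least twice in the flat list, via repeated list.count scans.
import Mathlib
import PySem

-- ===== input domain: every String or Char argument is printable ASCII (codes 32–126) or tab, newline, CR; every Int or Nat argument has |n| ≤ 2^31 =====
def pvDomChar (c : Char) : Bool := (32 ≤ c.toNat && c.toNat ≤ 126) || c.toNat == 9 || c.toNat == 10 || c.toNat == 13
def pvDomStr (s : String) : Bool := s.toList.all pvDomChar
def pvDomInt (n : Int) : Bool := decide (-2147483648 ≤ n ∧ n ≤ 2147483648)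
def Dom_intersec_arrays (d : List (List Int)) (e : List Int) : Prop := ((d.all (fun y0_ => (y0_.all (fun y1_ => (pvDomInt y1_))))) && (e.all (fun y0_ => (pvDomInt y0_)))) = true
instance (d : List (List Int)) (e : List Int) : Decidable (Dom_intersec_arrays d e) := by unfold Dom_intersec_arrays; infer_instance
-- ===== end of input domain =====

-- B replaces A's unq/inter duplicate-tracking state by a single flatten plus
-- per-element count tests; objective: simpler (same return value everywhere).

-- ===== PORT A =====
-- one step of A's inner loop over state (unq, inter)
def pvStepA (s : List Int × List Int) (j : Int) : List Int × List Int :=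
  if j ∈ s.1 then (s.1, s.2 ++ [j]) else (s.1 ++ [j], s.2)

def intersec_arrays (d : List (List Int)) (e : List Int) : Int :=
  let s := d.foldl (fun s i => i.foldl pvStepA s) ([], [])
  -- Python appends the stale loop variable j to inter1; only len(inter1) is
  -- returned, so the appended value is irrelevant and ported as the literal 0.
  let inter1 := e.foldl (fun (acc : List Int) i => if i ∈ s.2 then acc ++ [0] else acc) []
  (inter1.length : Int)

-- ===== PORT B =====
def intersec_arrays_alt (d : List (List Int)) (e : List Int) : Int :=
  let flat := d.flatMap (fun i => i)          -- [j for i in d for j in i]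
  e.foldl (fun (acc : Int) i => acc + (if 2 ≤ PySem.List.count flat i then 1 else 0)) 0

-- ===== PRECONDITION & SPEC =====
def Spec_intersec_arrays (d : List (List Int)) (e : List Int) (out : Int) : Prop := out = intersec_arrays_alt d e
instance (d : List (List Int)) (e : List Int) (out : Int) : Decidable (Spec_intersec_arrays d e out) := by unfold Spec_intersec_arrays; infer_instance

-- ===== CLAIM (what is proved, stated in full; the proofs are below) =====
def Claim_equal_intersec_arrays : Prop := ∀ (d : List (List Int)) (e : List Int), Dom_intersec_arrays d e → Spec_intersec_arrays d e (intersec_arrays d e)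

-- ===== LEMMAS AND PROOFS =====

-- A's nested loop over d equals the loop over the flattened list
theorem pv_foldl_nested (d : List (List Int)) (s : List Int × List Int) :
    d.foldl (fun s i => i.foldl pvStepA s) s = (d.flatMap (fun i => i)).foldl pvStepA s := by
  induction d generalizing s with
  | nil => rfl
  | cons h t ih => simp [List.flatMap_cons, List.foldl_append, ih]

-- invariant of A's duplicate loop: x ends up in inter iff it was already in
-- inter, or it occurs in l and was either already in unq or occurs ≥2 times in l
theorem pv_inv (l : List Int) (u r : List Int) (x : Int) :
    x ∈ (l.foldl pvStepA (u, r)).2 ↔ x ∈ r ∨ (x ∈ l ∧ (x ∈ u ∨ 2 ≤ l.count x)) := by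
  induction l generalizing u r with
  | nil => simp
  | cons j t ih =>
    rw [List.foldl_cons]
    have hmem : x ∈ t ↔ 1 ≤ List.count x t := by
      rw [← List.count_pos_iff]; omega
    by_cases hj : j ∈ u
    · rw [show pvStepA (u, r) j = (u, r ++ [j]) from by simp [pvStepA, hj], ih]
      by_cases hx : x = j
      · subst hx
        simp only [List.mem_append, List.mem_cons, List.count_cons_self,
          hmem, true_or, hj]
        by_cases hr : x ∈ r <;> simp [hr]
      · have hx' : ¬ j = x := fun h => hx h.symm
        simp [hx, hx']
    · rw [show pvStepA (u, r) j = (u ++ [j], r) from by simp [pvStepA, hj], ih]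
      by_cases hx : x = j
      · subst hx
        simp only [List.mem_append, List.mem_cons, List.count_cons_self,
          hmem, true_or]
        by_cases hr : x ∈ r
        · simp [hr]
        · simp [hr, hj]
      · have hx' : ¬ j = x := fun h => hx h.symm
        simp [hx, hx']

-- x ∈ inter (for the full run from ([],[])) iff x occurs at least twice in flat
theorem pv_mem_inter (flat : List Int) (x : Int) :
    x ∈ (flat.foldl pvStepA ([], [])).2 ↔ 2 ≤ flat.count x := by
  rw [pv_inv]
  constructor
  · rintro (h | ⟨_, h | h⟩) <;> simp_all
  · intro h
    exact Or.inr ⟨List.count_pos_iff.mp (by omega), Or.inr h⟩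

-- A's counting loop: length of the accumulated list
theorem pv_lenA (p : Int → Prop) [DecidablePred p] (e : List Int) (acc : List Int) :
    (e.foldl (fun (a : List Int) i => if p i then a ++ [0] else a) acc).length
      = acc.length + e.countP (fun i => decide (p i)) := by
  induction e generalizing acc with
  | nil => simp
  | cons h t ih =>
    by_cases hp : p h <;> simp [hp, ih] <;> omega

-- B's counting loop
theorem pv_lenB (q : Int → Prop) [DecidablePred q] (e : List Int) (a : Int) :
    e.foldl (fun (a : Int) i => a + (if q i then 1 else 0)) a
      = a + (e.countP (fun i => decide (q i)) : Int) := by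
  induction e generalizing a with
  | nil => simp
  | cons h t ih =>
    by_cases hq : q h <;> simp [hq, ih] <;> ring

-- ===== VERDICT (by name: the statement is the Claim_ definition above) =====
theorem intersec_arrays_spec : Claim_equal_intersec_arrays := by
  unfold Claim_equal_intersec_arrays
  intro d e _
  unfold Spec_intersec_arrays intersec_arrays intersec_arrays_alt
  rw [pv_foldl_nested]
  show ((List.foldl (fun (acc : List Int) i =>
          if i ∈ (List.foldl pvStepA ([], []) (d.flatMap (fun i => i))).2 then acc ++ [0] else acc)
          [] e).length : Int)
      = List.foldl (fun (acc : Int) i =>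
          acc + if 2 ≤ PySem.List.count (d.flatMap (fun i => i)) i then 1 else 0) 0 e
  rw [pv_lenA (p := fun i => i ∈ ((d.flatMap (fun i => i)).foldl pvStepA ([], [])).2),
      pv_lenB (q := fun i => 2 ≤ PySem.List.count (d.flatMap (fun i => i)) i)]
  simp only [List.length_nil, Nat.zero_add, Int.zero_add]
  congr 1
  apply List.countP_congr
  intro x _
  simp [pv_mem_inter, PySem.List.count_eq]
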